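-- pv_equiv track=rewrite | github.com/joscCE/prueba2 | yoquese/njsd.py | uno_cero
-- ===== SOURCE A (Python) =====
-- def uno_cero(num,exp):
--     if num == 0:
--         return 0
--     else:
--         if num%10 == 0:
--             return 1*10**exp + uno_cero(num//10,exp+1)
--         else:
--             return num%10*10**exp + uno_cero(num//10,exp+1)
-- ===== SOURCE B (Python) =====
-- def uno_cero(num, exp):
--     if num == 0:
--         return 0
--     digits = []
--     while num:
--         digits.append(num % 10 or 1)
--         num //= 10
--     r = 0
--     for d in reversed(digits):
--         r = r * 10 + d
--     return r * 10 ** exp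
-- ===== Notes on version B (the rewrite author's own statement) =====
-- stated objective: faster
-- what changed: B first collects the 0-replaced-by-1 digits into a list, evaluates that list with a single Horner fold, and applies the exponent once as r * 10**exp, instead of A's recursion that carries exp along and computes a fresh power 10**exp at every digit.
-- outside the precondition, e.g. on uno_cero(5772, -2): A returns 57.720000000000006, B returns 57.72; on uno_cero(5, -1): A returns 0.5, B returns 0.5
import Mathlib
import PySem

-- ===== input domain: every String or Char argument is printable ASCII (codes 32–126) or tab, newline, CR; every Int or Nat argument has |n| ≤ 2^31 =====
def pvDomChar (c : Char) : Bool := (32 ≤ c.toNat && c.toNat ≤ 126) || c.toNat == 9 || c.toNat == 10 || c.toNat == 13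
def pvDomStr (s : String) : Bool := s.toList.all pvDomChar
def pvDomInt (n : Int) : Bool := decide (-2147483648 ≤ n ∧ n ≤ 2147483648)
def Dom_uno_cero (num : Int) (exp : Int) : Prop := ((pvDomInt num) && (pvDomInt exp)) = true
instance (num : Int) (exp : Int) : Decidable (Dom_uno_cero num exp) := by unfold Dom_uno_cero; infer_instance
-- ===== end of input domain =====

-- B collects the 0→1-replaced digits into a list, evaluates it by one Horner fold and applies
-- 10**exp once, instead of A's recursion recomputing a power per digit (objective: alternative).


-- ===== PORT A =====
-- Literal port of A's recursion; fuel (num.natAbs + 1) only makes the recursion total — on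
-- Pre_ (num ≥ 0) it never runs out.  Python's 10**exp is ported as 10 ^ exp.toNat, exact on
-- the exp ≥ 0 side of Pre_.
def unoCeroRec : Nat → Int → Int → Int
  | 0, _, _ => 0
  | fuel + 1, num, exp =>
    if num = 0 then 0
    else
      if PySem.Int.mod num 10 = 0 then
        1 * 10 ^ exp.toNat + unoCeroRec fuel (PySem.Int.floordiv num 10) (exp + 1)
      else
        PySem.Int.mod num 10 * 10 ^ exp.toNat + unoCeroRec fuel (PySem.Int.floordiv num 10) (exp + 1)

def uno_cero (num : Int) (exp : Int) : Int := unoCeroRec (num.natAbs + 1) num exp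

-- ===== PORT B =====
-- Phase 1 of Source B: the while loop appending (num % 10 or 1); fuel only for totality.
def unoCeroDigits : Nat → Int → List Int → List Int
  | 0, _, acc => acc
  | fuel + 1, num, acc =>
    if num = 0 then acc
    else
      unoCeroDigits fuel (PySem.Int.floordiv num 10)
        (acc ++ [if PySem.Int.mod num 10 = 0 then 1 else PySem.Int.mod num 10])

def uno_cero_alt (num : Int) (exp : Int) : Int :=
  if num = 0 then 0
  else
    let digits := unoCeroDigits (num.natAbs + 1) num []
    let r := digits.reverse.foldl (fun r d => r * 10 + d) 0
    r * 10 ^ exp.toNat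

-- ===== PRECONDITION & SPEC =====
-- Pre_ excludes num < 0, where A recurses forever (RecursionError) — B's while loop also never
-- terminates there — and num ≠ 0 with exp < 0, where 10**exp makes A (and B) return a float,
-- not an int.
def Pre_uno_cero (num : Int) (exp : Int) : Prop := 0 ≤ num ∧ (num = 0 ∨ 0 ≤ exp)
instance (num : Int) (exp : Int) : Decidable (Pre_uno_cero num exp) := by
  unfold Pre_uno_cero; infer_instance

def pvWitness_uno_cero : Int × Int := (1002030, 2)

def Spec_uno_cero (num : Int) (exp : Int) (out : Int) : Prop := out = uno_cero_alt num exp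
instance (num : Int) (exp : Int) (out : Int) : Decidable (Spec_uno_cero num exp out) := by
  unfold Spec_uno_cero; infer_instance

-- ===== CLAIM (what is proved, stated in full; the proofs are below) =====
def Claim_equal_uno_cero : Prop := ∀ (num : Int) (exp : Int), Dom_uno_cero num exp → Pre_uno_cero num exp → Spec_uno_cero num exp (uno_cero num exp)

-- ===== LEMMAS AND PROOFS =====

-- Mathematical reference: the 0→1-replaced value of a natural number.
def repl : Nat → Int
  | 0 => 0
  | n + 1 =>
    (if (n + 1) % 10 = 0 then (1 : Int) else ((n + 1) % 10 : Int)) + 10 * repl ((n + 1) / 10)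
decreasing_by exact Nat.div_lt_self (Nat.succ_pos n) (by omega)

-- Reference digit list (least significant first, zeros replaced by 1).
def dl : Nat → List Int
  | 0 => []
  | n + 1 =>
    (if (n + 1) % 10 = 0 then (1 : Int) else ((n + 1) % 10 : Int)) :: dl ((n + 1) / 10)
decreasing_by exact Nat.div_lt_self (Nat.succ_pos n) (by omega)

lemma mod_natCast_ten (n : Nat) : PySem.Int.mod (n : Int) 10 = ((n % 10 : Nat) : Int) := by
  rw [PySem.Int.mod_eq_emod_of_pos (by norm_num : (0 : Int) < 10)]
  omega

lemma floordiv_natCast_ten (n : Nat) :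
    PySem.Int.floordiv (n : Int) 10 = ((n / 10 : Nat) : Int) := by
  rw [PySem.Int.floordiv_eq_ediv_of_pos (by norm_num : (0 : Int) < 10)]
  omega

lemma unoCeroRec_eq_repl :
    ∀ (fuel n : Nat) (exp : Int), n < fuel → 0 ≤ exp →
      unoCeroRec fuel (n : Int) exp = repl n * 10 ^ exp.toNat := by
  intro fuel
  induction fuel with
  | zero => intro n exp h; omega
  | succ f ih =>
    intro n exp hlt hexp
    cases n with
    | zero => simp [unoCeroRec, repl]
    | succ m =>
      have hne : ((m + 1 : Nat) : Int) ≠ 0 := by exact_mod_cast Nat.succ_ne_zero m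
      have hdiv : (m + 1) / 10 < f :=
        lt_of_lt_of_le (Nat.div_lt_self (Nat.succ_pos m) (by omega)) (by omega)
      have hrec := ih ((m + 1) / 10) (exp + 1) hdiv (by omega)
      have htn : (exp + 1).toNat = exp.toNat + 1 := by omega
      rw [show unoCeroRec (f + 1) ((m + 1 : Nat) : Int) exp
            = if ((m + 1 : Nat) : Int) = 0 then 0
              else
                if PySem.Int.mod ((m + 1 : Nat) : Int) 10 = 0 then
                  1 * 10 ^ exp.toNat
                    + unoCeroRec f (PySem.Int.floordiv ((m + 1 : Nat) : Int) 10) (exp + 1)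
                else
                  PySem.Int.mod ((m + 1 : Nat) : Int) 10 * 10 ^ exp.toNat
                    + unoCeroRec f (PySem.Int.floordiv ((m + 1 : Nat) : Int) 10) (exp + 1)
          from rfl]
      rw [if_neg hne, mod_natCast_ten, floordiv_natCast_ten, hrec, htn]
      by_cases h0 : (m + 1) % 10 = 0
      · have h0' : (((m + 1) % 10 : Nat) : Int) = 0 := by exact_mod_cast h0
        rw [if_pos h0', repl, if_pos h0]
        ring
      · have h0' : (((m + 1) % 10 : Nat) : Int) ≠ 0 := by exact_mod_cast h0
        rw [if_neg h0', repl, if_neg h0]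
        push_cast
        ring

lemma unoCeroDigits_eq_dl :
    ∀ (fuel n : Nat) (acc : List Int), n < fuel →
      unoCeroDigits fuel (n : Int) acc = acc ++ dl n := by
  intro fuel
  induction fuel with
  | zero => intro n acc h; omega
  | succ f ih =>
    intro n acc hlt
    cases n with
    | zero => simp [unoCeroDigits, dl]
    | succ m =>
      have hne : ((m + 1 : Nat) : Int) ≠ 0 := by exact_mod_cast Nat.succ_ne_zero m
      have hdiv : (m + 1) / 10 < f :=
        lt_of_lt_of_le (Nat.div_lt_self (Nat.succ_pos m) (by omega)) (by omega)
      rw [show unoCeroDigits (f + 1) ((m + 1 : Nat) : Int) acc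
            = if ((m + 1 : Nat) : Int) = 0 then acc
              else
                unoCeroDigits f (PySem.Int.floordiv ((m + 1 : Nat) : Int) 10)
                  (acc ++ [if PySem.Int.mod ((m + 1 : Nat) : Int) 10 = 0 then 1
                           else PySem.Int.mod ((m + 1 : Nat) : Int) 10])
          from rfl]
      rw [if_neg hne, mod_natCast_ten, floordiv_natCast_ten,
        ih ((m + 1) / 10) _ hdiv, dl]
      by_cases h0 : (m + 1) % 10 = 0
      · have h0' : (((m + 1) % 10 : Nat) : Int) = 0 := by exact_mod_cast h0
        rw [if_pos h0', if_pos h0, List.append_assoc]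
        rfl
      · have h0' : (((m + 1) % 10 : Nat) : Int) ≠ 0 := by exact_mod_cast h0
        rw [if_neg h0', if_neg h0, List.append_assoc]
        rfl

lemma horner_dl (n : Nat) :
    (dl n).reverse.foldl (fun r d => r * 10 + d) 0 = repl n := by
  induction n using Nat.strong_induction_on with
  | _ n ih =>
    cases n with
    | zero => simp [dl, repl]
    | succ m =>
      rw [dl, repl]
      simp only [List.reverse_cons, List.foldl_append, List.foldl_cons, List.foldl_nil,
        ih ((m + 1) / 10) (Nat.div_lt_self (Nat.succ_pos m) (by omega))]
      ring

-- ===== VERDICT (by name: the statement is the Claim_ definition above) =====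
theorem uno_cero_spec : Claim_equal_uno_cero := by
  intro num exp _ hpre
  obtain ⟨hnum, hexp⟩ := hpre
  unfold Spec_uno_cero uno_cero uno_cero_alt
  by_cases h0 : num = 0
  · subst h0; simp [unoCeroRec]
  · have hexp' : 0 ≤ exp := hexp.resolve_left h0
    obtain ⟨n, rfl⟩ : ∃ n : Nat, num = (n : Int) := ⟨num.toNat, (Int.toNat_of_nonneg hnum).symm⟩
    have habs : (n : Int).natAbs = n := Int.natAbs_natCast n
    rw [if_neg h0, habs]
    rw [unoCeroRec_eq_repl (n + 1) n exp (by omega) hexp',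
        unoCeroDigits_eq_dl (n + 1) n [] (by omega)]
    simp [horner_dl n]
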